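-- pv_equiv track=rewrite | github.com/Grodnomafia/MyFirstExpinPython | task_64.py | foo
-- ===== SOURCE A (Python) =====
-- def foo(new):
--     new_list = {}
--     for count in new:
--         new_list[count] = new_list.get(count, 0) + 1
--     odd_coint = 0
--     for odd in new_list.values():
--         if odd % 2 != 0:
--             odd_coint += 1
--         if odd_coint > 1:
--             return False
--     return True
-- ===== SOURCE B (Python) =====
-- def foo(new):
--     seen = set()
--     for x in new:
--         if x in seen:
--             seen.discard(x)
--         else:
--             seen.add(x)
--     return len(seen) <= 1
-- ===== Notes on version B (the rewrite author's own statement) =====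
-- stated objective: simpler
-- what changed: Replaces the frequency dictionary plus a second odd-counting loop over its values by a single pass that toggles each element in a parity set and checks its final size.
import Mathlib
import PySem

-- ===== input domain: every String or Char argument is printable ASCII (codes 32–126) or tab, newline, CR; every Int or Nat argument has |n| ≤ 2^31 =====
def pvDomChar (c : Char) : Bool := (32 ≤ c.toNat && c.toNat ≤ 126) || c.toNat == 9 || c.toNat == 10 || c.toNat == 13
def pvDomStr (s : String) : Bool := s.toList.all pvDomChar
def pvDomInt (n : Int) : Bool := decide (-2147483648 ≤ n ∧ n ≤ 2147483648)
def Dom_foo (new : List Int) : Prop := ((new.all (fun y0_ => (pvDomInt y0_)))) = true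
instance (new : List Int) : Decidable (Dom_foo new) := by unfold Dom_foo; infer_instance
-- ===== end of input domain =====

-- B replaces A's frequency dictionary + odd-count loop by one toggling pass over a parity set (objective: simpler).

-- ===== PORT A =====
-- the second loop of A: 'for odd in values: if odd % 2 != 0: odd_coint += 1; if odd_coint > 1: return False'
def fooOddLoop (oddCoint : Int) : List Int → Bool
  | [] => true
  | odd :: rest =>
    let oddCoint' := if PySem.Int.mod odd 2 ≠ 0 then oddCoint + 1 else oddCoint
    if oddCoint' > 1 then false else fooOddLoop oddCoint' rest

def foo (new : List Int) : Bool :=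
  let newList := new.foldl (fun d count => d.insert count (d.getD count 0 + 1)) PySem.Dict.empty
  fooOddLoop 0 newList.values

-- ===== PORT B =====
def fooToggle (seen : PySem.Set Int) (x : Int) : PySem.Set Int :=
  if PySem.Set.contains seen x then PySem.Set.discard seen x else PySem.Set.add seen x

def foo_alt (new : List Int) : Bool :=
  let seen := new.foldl fooToggle PySem.Set.empty
  decide (PySem.Set.len seen ≤ 1)

-- ===== PRECONDITION & SPEC =====
def Spec_foo (new : List Int) (out : Bool) : Prop := out = foo_alt new
instance (new : List Int) (out : Bool) : Decidable (Spec_foo new out) := by unfold Spec_foo; infer_instance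

-- ===== CLAIM (what is proved, stated in full; the proofs are below) =====
def Claim_equal_foo : Prop := ∀ (new : List Int), Dom_foo new → Spec_foo new (foo new)

-- ===== LEMMAS AND PROOFS =====

-- A's early-return loop just decides whether at most one value is odd
theorem fooOddLoop_eq (vs : List Int) : ∀ c : Int, c ≤ 1 →
    fooOddLoop c vs = decide (c + (vs.countP (fun v => decide (PySem.Int.mod v 2 ≠ 0))) ≤ 1) := by
  induction vs with
  | nil =>
    intro c hc
    unfold fooOddLoop
    simp only [List.countP_nil, Nat.cast_zero, add_zero]
    exact (decide_eq_true hc).symm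
  | cons v rest ih =>
    intro c hc
    unfold fooOddLoop
    by_cases hv : PySem.Int.mod v 2 ≠ 0
    · have hcnt : (v :: rest).countP (fun w => decide (PySem.Int.mod w 2 ≠ 0))
          = rest.countP (fun w => decide (PySem.Int.mod w 2 ≠ 0)) + 1 := by
        have hv' : v % 2 ≠ 0 := by
          rwa [PySem.Int.mod_eq_emod_of_pos (show (0:Int) < 2 by omega)] at hv
        simp [List.countP_cons]
        omega
      rw [if_pos hv, hcnt]
      by_cases h1 : c + 1 > 1
      · rw [if_pos h1]
        symm
        rw [decide_eq_false_iff_not]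
        push_cast
        omega
      · rw [if_neg h1, ih (c + 1) (by omega)]
        simp only [decide_eq_decide]
        push_cast
        omega
    · have hcnt : (v :: rest).countP (fun w => decide (PySem.Int.mod w 2 ≠ 0))
          = rest.countP (fun w => decide (PySem.Int.mod w 2 ≠ 0)) := by
        have hv' : v % 2 = 0 := by
          have := hv
          rw [PySem.Int.mod_eq_emod_of_pos (show (0:Int) < 2 by omega)] at this
          omega
        simp [List.countP_cons]
        omega
      rw [if_neg hv, hcnt, if_neg (show ¬ c > 1 by omega), ih c hc]

-- membership in the toggle fold = running parity flipped per occurrence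
theorem mem_toggle_fold (xs : List Int) : ∀ (s : PySem.Set Int), s.Nodup → ∀ y : Int,
    (y ∈ xs.foldl fooToggle s ↔ (y ∈ s ↔ xs.count y % 2 = 0)) := by
  induction xs with
  | nil => intro s _ y; simp
  | cons x xs ih =>
    intro s hs y
    have hs' : (fooToggle s x).Nodup := by
      unfold fooToggle
      split
      · exact PySem.Set.nodup_discard s x hs
      · exact PySem.Set.nodup_add s x hs
    simp only [List.foldl_cons]
    rw [ih (fooToggle s x) hs' y]
    have hmem : y ∈ fooToggle s x ↔ (if y = x then x ∉ s else y ∈ s) := by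
      unfold fooToggle
      split
      · rename_i h
        rw [PySem.Set.mem_discard]
        have hxs : x ∈ s := (PySem.Set.contains_iff s x).mp h
        by_cases hyx : y = x <;> simp [hyx, hxs]
      · rename_i h
        rw [PySem.Set.mem_add]
        have hxs : x ∉ s := fun hm => h ((PySem.Set.contains_iff s x).mpr hm)
        by_cases hyx : y = x <;> simp [hyx, hxs]
    rw [hmem]
    by_cases hyx : y = x
    · subst hyx
      rw [if_pos rfl, List.count_cons_self]
      have hpar : ((xs.count y + 1) % 2 = 0) ↔ ¬ (xs.count y % 2 = 0) := by omega
      rw [hpar]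
      tauto
    · rw [if_neg hyx]
      have : (x :: xs).count y = xs.count y := by
        simp [show ¬ x = y from fun h => hyx h.symm]
      rw [this]

theorem nodup_toggle_fold (xs : List Int) : ∀ (s : PySem.Set Int), s.Nodup →
    (xs.foldl fooToggle s).Nodup := by
  induction xs with
  | nil => intro s hs; simpa using hs
  | cons x xs ih =>
    intro s hs
    simp only [List.foldl_cons]
    apply ih
    unfold fooToggle
    split
    · exact PySem.Set.nodup_discard s x hs
    · exact PySem.Set.nodup_add s x hs

-- from the empty set: exactly the elements with odd total count
theorem mem_toggle_fold_empty (xs : List Int) (y : Int) :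
    y ∈ xs.foldl fooToggle PySem.Set.empty ↔ xs.count y % 2 = 1 := by
  rw [mem_toggle_fold xs PySem.Set.empty (by simp [PySem.Set.empty]) y]
  have hnil : y ∉ (PySem.Set.empty : PySem.Set Int) := by simp [PySem.Set.empty]
  have hpar : (xs.count y % 2 = 1) ↔ ¬ (xs.count y % 2 = 0) := by omega
  rw [hpar]
  tauto

theorem foo_eq_alt (new : List Int) : foo new = foo_alt new := by
  simp only [foo, foo_alt]
  rw [PySem.Dict.foldl_insert_getD_add_one_eq_counter]
  have hnd := PySem.Dict.nodup_keys_counter (xs := new)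
  rw [PySem.Dict.values_eq_map_keys _ hnd 0, PySem.Dict.keys_counter]
  rw [fooOddLoop_eq _ 0 (by omega)]
  have hmap : (PySem.Set.ofList new).map (fun k => (PySem.Dict.counter new).getD k 0)
      = (PySem.Set.ofList new).map (fun k => ((new.count k : Int))) := by
    apply List.map_congr_left
    intro k _
    exact PySem.Dict.getD_counter new k
  rw [hmap, List.countP_map]
  rw [List.countP_congr (l := PySem.Set.ofList new)
      (p := (fun v => decide (PySem.Int.mod v 2 ≠ 0)) ∘ fun k => ((new.count k : Int)))
      (q := fun k => decide (new.count k % 2 = 1))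
      (fun k _ => by
        simp only [Function.comp]
        rw [PySem.Int.mod_eq_emod_of_pos (show (0:Int) < 2 by omega)]
        simp only [decide_eq_true_eq]
        omega)]
  rw [List.countP_eq_length_filter]
  have hperm : ((PySem.Set.ofList new).filter (fun k => decide (new.count k % 2 = 1))).Perm
      (new.foldl fooToggle PySem.Set.empty) := by
    rw [List.perm_ext_iff_of_nodup (List.Nodup.filter _ (PySem.Set.nodup_ofList new))
        (nodup_toggle_fold new PySem.Set.empty (by simp [PySem.Set.empty]))]
    intro y
    simp only [List.mem_filter, PySem.Set.mem_ofList, mem_toggle_fold_empty, decide_eq_true_eq]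
    constructor
    · rintro ⟨_, h⟩; exact h
    · intro h
      refine ⟨?_, h⟩
      have hc : new.count y ≠ 0 := by
        intro h0; rw [h0] at h; simp at h
      exact List.count_pos_iff.mp (Nat.pos_of_ne_zero hc)
  rw [hperm.length_eq]
  simp only [PySem.Set.len]
  simp only [decide_eq_decide]
  omega

-- ===== VERDICT (by name: the statement is the Claim_ definition above) =====
theorem foo_spec : Claim_equal_foo := by
  intro new _
  unfold Spec_foo
  exact foo_eq_alt new
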